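-- pv_equiv track=rewrite | github.com/miliar/Code_Jam_Webscraper | solutions_python/solutions_year12_round0_nr2/1206.py | checkP
-- ===== SOURCE A (Python) =====
-- def checkP(score, p):
-- 	for a in range(10, -1, -1):
--
-- 		for b in range(a, a-2, -1):
--
-- 			if (b < 0):
-- 				continue
-- 			for c in range(b, a-2, -1):
-- 				if (c < 0):
-- 					continue
-- 				#print str(a) + " " + str(b) + " " + str(c)
-- 				if (a+b+c == score and a >= p):
-- 					return True
-- 				elif (a+b+c < score):
-- 					return False
-- ===== SOURCE B (Python) =====
-- def checkP(score, p):
--     # A non-surprising triple with maximum a reaches exactly the totals 3a-2, 3a-1, 3a,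
--     # so the best achievable maximum for a given total is (score + 2) // 3.
--     if score < 0 or score > 30:
--         return False
--     return (score + 2) // 3 >= p
-- ===== Notes on version B (the rewrite author's own statement) =====
-- stated objective: simpler
-- what changed: Replaces the descending triple nested loop with the closed form (score+2)//3 >= p plus a 0..30 range check, since the totals reachable with maximum score a are exactly 3a-2..3a.
-- outside the precondition, e.g. on checkP(-3, 0): A returns None, B returns False; on checkP(0, 1): A returns None, B returns False
import Mathlib
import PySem

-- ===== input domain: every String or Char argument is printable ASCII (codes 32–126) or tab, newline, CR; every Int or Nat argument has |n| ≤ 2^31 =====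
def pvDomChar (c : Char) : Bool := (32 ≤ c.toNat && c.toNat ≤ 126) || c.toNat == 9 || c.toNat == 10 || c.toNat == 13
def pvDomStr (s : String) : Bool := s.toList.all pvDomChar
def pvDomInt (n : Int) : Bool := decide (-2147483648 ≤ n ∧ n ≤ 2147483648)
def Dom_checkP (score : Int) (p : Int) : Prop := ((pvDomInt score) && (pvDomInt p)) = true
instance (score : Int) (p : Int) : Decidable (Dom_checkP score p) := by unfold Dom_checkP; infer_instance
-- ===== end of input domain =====

-- B replaces A's descending triple nested loop with the closed form (score+2)//3 >= p
-- (plus a 0..30 range check): simpler, same value on every input where A returns a Bool.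


-- ===== PORT A =====
-- inner loop over c: returns some true / some false on A's returns, none = fall through
def pvLoopC (score p a b : Int) : List Int → Option Bool
  | [] => none
  | c :: cs =>
    if c < 0 then pvLoopC score p a b cs
    else if a + b + c = score ∧ a ≥ p then some true
    else if a + b + c < score then some false
    else pvLoopC score p a b cs

def pvLoopB (score p a : Int) : List Int → Option Bool
  | [] => none
  | b :: bs =>
    if b < 0 then pvLoopB score p a bs
    else match pvLoopC score p a b (PySem.List.pyRange b (a - 2) (-1)) with
      | some r => some r
      | none => pvLoopB score p a bs

def pvLoopA (score p : Int) : List Int → Option Bool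
  | [] => none
  | a :: as_ =>
    match pvLoopB score p a (PySem.List.pyRange a (a - 2) (-1)) with
    | some r => some r
    | none => pvLoopA score p as_

-- A returns None (no Bool) when the loops fall through; those inputs are excluded by Pre_checkP,
-- so the `.getD false` default is never reached on admitted inputs.
def checkP (score : Int) (p : Int) : Bool :=
  (pvLoopA score p (PySem.List.pyRange 10 (-1) (-1))).getD false

-- ===== PORT B =====
def checkP_alt (score : Int) (p : Int) : Bool :=
  if score < 0 || score > 30 then false
  else decide (PySem.Int.floordiv (score + 2) 3 ≥ p)

-- ===== PRECONDITION & SPEC =====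
-- Pre_ excludes exactly the inputs on which Python A falls off the loops and returns None
-- (score < 0, or score = 0 with p > 0), which is not a value of the declared Bool type.
def Pre_checkP (score : Int) (p : Int) : Prop := 1 ≤ score ∨ (score = 0 ∧ p ≤ 0)
instance (score : Int) (p : Int) : Decidable (Pre_checkP score p) := by unfold Pre_checkP; infer_instance
def pvWitness_checkP : Int × Int := (3, 1)

def Spec_checkP (score : Int) (p : Int) (out : Bool) : Prop := out = checkP_alt score p
instance (score : Int) (p : Int) (out : Bool) : Decidable (Spec_checkP score p out) := by unfold Spec_checkP; infer_instance

-- ===== CLAIM (what is proved, stated in full; the proofs are below) =====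
def Claim_equal_checkP : Prop := ∀ (score : Int) (p : Int), Dom_checkP score p → Pre_checkP score p → Spec_checkP score p (checkP score p)

-- ===== LEMMAS AND PROOFS =====

-- the loops compare p only against their fixed `a`; replacing p by any p' with the same comparisons preserves the result
theorem pvLoopC_congr (score p p' a b : Int) (h : (a ≥ p) = (a ≥ p')) :
    ∀ cs : List Int, pvLoopC score p a b cs = pvLoopC score p' a b cs := by
  intro cs
  induction cs with
  | nil => rfl
  | cons c cs ih => simp [pvLoopC, h, ih]

theorem pvLoopB_congr (score p p' a : Int) (h : (a ≥ p) = (a ≥ p')) :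
    ∀ bs : List Int, pvLoopB score p a bs = pvLoopB score p' a bs := by
  intro bs
  induction bs with
  | nil => rfl
  | cons b bs ih => simp [pvLoopB, pvLoopC_congr score p p' a b h, ih]

theorem pvLoopA_congr (score p p' : Int) :
    ∀ as_ : List Int, (∀ a ∈ as_, (a ≥ p) = (a ≥ p')) →
      pvLoopA score p as_ = pvLoopA score p' as_ := by
  intro as_
  induction as_ with
  | nil => intro _; rfl
  | cons a as_ ih =>
    intro h
    have ha := h a (List.mem_cons_self)
    simp [pvLoopA, pvLoopB_congr score p p' a ha, ih (fun x hx => h x (List.mem_cons_of_mem a hx))]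

theorem checkP_congr (score p p' : Int) (h10 : ∀ a : Int, 0 ≤ a → a ≤ 10 → ((a ≥ p) ↔ (a ≥ p'))) :
    checkP score p = checkP score p' := by
  unfold checkP
  rw [pvLoopA_congr score p p']
  intro a ha
  have hmem : a ∈ PySem.List.pyRange 10 (-1) (-1) := ha
  have hl : PySem.List.pyRange 10 (-1) (-1) = [10,9,8,7,6,5,4,3,2,1,0] := by decide
  rw [hl] at hmem
  have hb : 0 ≤ a ∧ a ≤ 10 := by
    simp [List.mem_cons] at hmem
    omega
  exact propext (h10 a hb.1 hb.2)

theorem pvBig (score p : Int) (h : 30 < score) : checkP score p = false := by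
  have hr1 : PySem.List.pyRange 10 (-1) (-1) = [10,9,8,7,6,5,4,3,2,1,0] := by decide
  have hr2 : PySem.List.pyRange 10 8 (-1) = [10,9] := by decide
  have hne : ¬((30:Int) = score ∧ p ≤ 10) := by omega
  have hlt : (30:Int) < score := by omega
  simp [checkP, pvLoopA, pvLoopB, pvLoopC, hr1, hr2, hne, hlt]

theorem pvSmall : ∀ (s q : Int), 0 ≤ s → s ≤ 30 → 0 ≤ q → q ≤ 11 → checkP s q = checkP_alt s q := by
  intro s q h1 h2 h3 h4
  interval_cases s <;> interval_cases q <;> decide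

-- ===== VERDICT (by name: the statement is the Claim_ definition above) =====
theorem checkP_spec : Claim_equal_checkP := by
  intro score p _ hpre
  unfold Spec_checkP
  by_cases hbig : 30 < score
  · rw [pvBig score p hbig]
    unfold checkP_alt
    simp [show score > 30 by omega]
  · -- 0 ≤ score ≤ 30 on Pre_; clamp p into [0, 11]
    have hs0 : 0 ≤ score := by unfold Pre_checkP at hpre; omega
    have hs30 : score ≤ 30 := by omega
    set p' : Int := if p ≤ 0 then 0 else if p > 10 then 11 else p with hp'
    have hA : checkP score p = checkP score p' := by
      apply checkP_congr
      intro a ha hb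
      rw [hp']
      split_ifs <;> omega
    have hB : checkP_alt score p = checkP_alt score p' := by
      unfold checkP_alt
      have hk0 : 0 ≤ PySem.Int.floordiv (score + 2) 3 := by
        have := Int.ediv_nonneg (a := score + 2) (b := 3) (by omega) (by omega)
        simpa [PySem.Int.floordiv, Int.fdiv_eq_ediv] using this
      have hk10 : PySem.Int.floordiv (score + 2) 3 ≤ 10 := by
        have : (score + 2) / 3 ≤ 10 := by omega
        simpa [PySem.Int.floordiv, Int.fdiv_eq_ediv] using this
      have hiff : (PySem.Int.floordiv (score + 2) 3 ≥ p) = (PySem.Int.floordiv (score + 2) 3 ≥ p') := by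
        apply propext
        rw [hp']
        split_ifs <;> omega
      simp only [hiff]
    rw [hA, hB]
    exact pvSmall score p' hs0 hs30 (by omega) (by omega)
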